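-- pv_equiv track=rewrite | github.com/rubzip/adventofcode_22 | day_03/03_part2.py | total_priority
-- ===== SOURCE A (Python) =====
-- def get_priority(char):
-- 	if char.islower():
-- 		return ord(char)-96
-- 	elif char.isupper():
-- 		return ord(char)-38
-- 	else:
-- 		pass
--
-- def total_priority(team):
-- 	priority = 0
--
-- 	rucksack1 = set(team[0])
-- 	rucksack2 = set(team[1])
-- 	rucksack3 = set(team[2])
--
-- 	#Here we check coincidences:
-- 	for i in rucksack1:
-- 		if i in rucksack2 and i in rucksack3:
-- 			priority += get_priority(i)
--
-- 	return priority
-- ===== SOURCE B (Python) =====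
-- def get_priority(char):
--     if char.islower():
--         return ord(char) - 96
--     elif char.isupper():
--         return ord(char) - 38
--
--
-- def total_priority(team):
--     # frequency table: in how many of the three rucksacks does each item appear?
--     counts = {}
--     for rucksack in (team[0], team[1], team[2]):
--         for ch in set(rucksack):
--             counts[ch] = counts.get(ch, 0) + 1
--     total = 0
--     for ch, n in counts.items():
--         if n == 3:
--             total += get_priority(ch)
--     return total
-- ===== Notes on version B (the rewrite author's own statement) =====
-- stated objective: alternative
-- what changed: Replaces the membership scan (iterate set(team[0]), test each char for membership in set(team[1]) and set(team[2])) by a single frequency table counting in how many of the three rucksack-sets each char occurs, then summing priorities of chars with count 3.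
import Mathlib
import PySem

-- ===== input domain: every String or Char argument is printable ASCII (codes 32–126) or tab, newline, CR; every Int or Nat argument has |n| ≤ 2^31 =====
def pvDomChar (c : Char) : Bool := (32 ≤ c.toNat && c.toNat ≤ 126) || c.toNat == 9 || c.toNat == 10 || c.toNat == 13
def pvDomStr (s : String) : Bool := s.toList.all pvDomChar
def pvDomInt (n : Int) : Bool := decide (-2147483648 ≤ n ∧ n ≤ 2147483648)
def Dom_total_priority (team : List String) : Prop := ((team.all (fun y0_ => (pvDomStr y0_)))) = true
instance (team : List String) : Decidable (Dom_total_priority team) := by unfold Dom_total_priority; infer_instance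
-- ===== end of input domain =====

-- B replaces A's membership scan by a frequency table over the three char-sets; same value, similar cost.

-- ===== PORT A =====
-- shared helper (identical in both sources); returns none where Python returns None
def get_priority (char : Char) : Option Int :=
  if PySem.Chars.islower char then some ((char.toNat : Int) - 96)
  else if PySem.Chars.isupper char then some ((char.toNat : Int) - 38)
  else none

def total_priority (team : List String) : Int :=
  match PySem.List.pyGet? team 0, PySem.List.pyGet? team 1, PySem.List.pyGet? team 2 with
  | some t1, some t2, some t3 =>
      let rucksack1 : PySem.Set Char := PySem.Set.ofList t1.toList
      let rucksack2 : PySem.Set Char := PySem.Set.ofList t2.toList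
      let rucksack3 : PySem.Set Char := PySem.Set.ofList t3.toList
      -- 'priority += get_priority(i)': .getD 0 is only reached under Pre_, where get_priority is some
      rucksack1.foldl (fun priority i =>
        if PySem.Set.contains rucksack2 i && PySem.Set.contains rucksack3 i
        then priority + (get_priority i).getD 0 else priority) 0
  | _, _, _ => 0   -- IndexError (team shorter than 3): outside Pre_

-- ===== PORT B =====
-- B's own copy of the helper (identical source in Source B)
def get_priority_alt (char : Char) : Option Int :=
  if PySem.Chars.islower char then some ((char.toNat : Int) - 96)
  else if PySem.Chars.isupper char then some ((char.toNat : Int) - 38)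
  else none

def total_priority_alt (team : List String) : Int :=
  -- B indexes the three rucksacks one by one (team[0], team[1], team[2])
  match PySem.List.pyGet? team 0 with
  | none => 0   -- IndexError: outside Pre_
  | some t1 =>
  match PySem.List.pyGet? team 1 with
  | none => 0
  | some t2 =>
  match PySem.List.pyGet? team 2 with
  | none => 0
  | some t3 =>
      -- counts[ch] = counts.get(ch, 0) + 1 over the three sets
      let counts : PySem.Dict Char Int :=
        [t1, t2, t3].foldl (fun d r =>
          (PySem.Set.ofList r.toList).foldl (fun d ch => d.insert ch (d.getD ch 0 + 1)) d)
          PySem.Dict.empty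
      -- 'total += get_priority(ch)': .getD 0 only reached under Pre_
      counts.items.foldl (fun total kv =>
        if kv.2 == (3 : Int) then total + (get_priority_alt kv.1).getD 0 else total) 0

-- ===== PRECONDITION & SPEC =====
-- Pre_ excludes exactly the inputs where A raises: team shorter than 3 (IndexError), and a char common to
-- all three rucksacks that is not a letter (get_priority returns None, 'priority += None' is a TypeError).
def Pre_total_priority (team : List String) : Prop :=
  3 ≤ team.length ∧
  ((team.getD 0 "").toList.all fun c =>
    !((team.getD 1 "").toList.contains c) || !((team.getD 2 "").toList.contains c) ||
      (PySem.Chars.islower c || PySem.Chars.isupper c)) = true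
instance (team : List String) : Decidable (Pre_total_priority team) := by
  unfold Pre_total_priority; infer_instance

def pvWitness_total_priority : List String := ["a", "a", "a"]

def Spec_total_priority (team : List String) (out : Int) : Prop := out = total_priority_alt team
instance (team : List String) (out : Int) : Decidable (Spec_total_priority team out) := by
  unfold Spec_total_priority; infer_instance

-- ===== CLAIM (what is proved, stated in full; the proofs are below) =====
def Claim_equal_total_priority : Prop := ∀ (team : List String), Dom_total_priority team → Pre_total_priority team → Spec_total_priority team (total_priority team)

-- ===== LEMMAS AND PROOFS =====

theorem get_priority_alt_eq : get_priority_alt = get_priority := rfl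

-- 'if p(x): acc += g(x)' loop as a sum
theorem foldl_if_add {α : Type} (l : List α) (p : α → Bool) (g : α → Int) (a : Int) :
    l.foldl (fun acc x => if p x then acc + g x else acc) a
      = a + (l.map (fun x => if p x then g x else 0)).sum := by
  induction l generalizing a with
  | nil => simp
  | cons x l ih => simp [List.foldl, ih]; split_ifs <;> ring

-- a 'for x in l: s.add(x)' loop starting from s appends only elements not in s
theorem foldl_set_add_exists {α : Type} [BEq α] [LawfulBEq α] (l : List α) (s : PySem.Set α) :
    ∃ extra : List α, l.foldl PySem.Set.add s = s ++ extra ∧ ∀ x ∈ extra, x ∉ s := by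
  induction l generalizing s with
  | nil => exact ⟨[], by simp⟩
  | cons x l ih =>
    by_cases hx : x ∈ s
    · obtain ⟨e, he, hmem⟩ := ih s
      exact ⟨e, by simpa [List.foldl, PySem.Set.add_of_mem hx] using he, hmem⟩
    · obtain ⟨e, he, hmem⟩ := ih (s ++ [x])
      refine ⟨x :: e, ?_, ?_⟩
      · simpa [List.foldl, PySem.Set.add_of_not_mem hx] using he
      · intro y hy
        rcases List.mem_cons.mp hy with rfl | hy
        · exact hx
        · intro hys; exact hmem y hy (by simp [hys])

-- 'for x in l: s.add(x)' over a Nodup l disjoint from s appends l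
theorem foldl_set_add_nodup {α : Type} [BEq α] [LawfulBEq α] (l : List α) (s : PySem.Set α)
    (hnd : l.Nodup) (hdis : ∀ x ∈ l, x ∉ s) : l.foldl PySem.Set.add s = s ++ l := by
  induction l generalizing s with
  | nil => simp
  | cons x l ih =>
    have hx : x ∉ s := hdis x (by simp)
    rw [List.foldl_cons, PySem.Set.add_of_not_mem hx,
      ih (s ++ [x]) hnd.of_cons (fun y hy => by
        simp only [List.mem_append, List.mem_singleton]
        rintro (hys | rfl)
        · exact hdis y (by simp [hy]) hys
        · exact (List.nodup_cons.mp hnd).1 hy)]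
    simp

-- ===== VERDICT (by name: the statement is the Claim_ definition above) =====
theorem total_priority_spec : Claim_equal_total_priority := by
  intro team hdom hpre
  obtain ⟨hlen, hlet⟩ := hpre
  rcases team with _ | ⟨t1, team⟩; · simp at hlen
  rcases team with _ | ⟨t2, team⟩; · simp at hlen
  rcases team with _ | ⟨t3, rest⟩; · simp at hlen
  unfold Spec_total_priority total_priority total_priority_alt
  rw [get_priority_alt_eq]
  simp only [PySem.List.pyGet?_zero_cons]
  have h1 : PySem.List.pyGet? (t1 :: t2 :: t3 :: rest) 1 = some t2 := by
    simpa using PySem.List.pyGet?_ofNat (n := 1) (xs := t1 :: t2 :: t3 :: rest) (by simp)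
  have h2 : PySem.List.pyGet? (t1 :: t2 :: t3 :: rest) 2 = some t3 := by
    simpa using PySem.List.pyGet?_ofNat (n := 2) (xs := t1 :: t2 :: t3 :: rest) (by simp)
  rw [h1, h2]
  dsimp only []
  set s1 : PySem.Set Char := PySem.Set.ofList t1.toList with hs1
  set s2 : PySem.Set Char := PySem.Set.ofList t2.toList with hs2
  set s3 : PySem.Set Char := PySem.Set.ofList t3.toList with hs3
  have hcounts : [t1, t2, t3].foldl (fun d r =>
      (PySem.Set.ofList r.toList).foldl (fun d ch => d.insert ch (d.getD ch 0 + 1)) d)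
      PySem.Dict.empty = PySem.Dict.counter (s1 ++ s2 ++ s3) := by
    rw [← PySem.Dict.foldl_insert_getD_add_one_eq_counter, List.foldl_append, List.foldl_append]
    rfl
  rw [hcounts, PySem.Dict.items_counter]
  rw [foldl_if_add, foldl_if_add, List.map_map]
  simp only [zero_add]
  obtain ⟨extra, hext, hxmem⟩ := foldl_set_add_exists (s2 ++ s3) s1
  have hnd1 : s1.Nodup := PySem.Set.nodup_ofList _
  have hself : List.foldl PySem.Set.add ([] : PySem.Set Char) s1 = s1 := by
    simpa using foldl_set_add_nodup s1 [] hnd1 (by simp)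
  have hofl : PySem.Set.ofList (s1 ++ s2 ++ s3) = s1 ++ extra := by
    rw [PySem.Set.ofList_eq_foldl, List.append_assoc, List.foldl_append, hself]
    exact hext
  rw [hofl, List.map_append, List.sum_append]
  have hc1 : ∀ k, List.count k s1 ≤ 1 := List.nodup_iff_count_le_one.mp hnd1
  have hc2 : ∀ k, List.count k s2 ≤ 1 := List.nodup_iff_count_le_one.mp (PySem.Set.nodup_ofList _)
  have hc3 : ∀ k, List.count k s3 ≤ 1 := List.nodup_iff_count_le_one.mp (PySem.Set.nodup_ofList _)
  have hzero : (List.map ((fun x => if (x.2 == 3) = true then (get_priority x.1).getD 0 else 0) ∘ fun k =>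
      (k, (List.count k (s1 ++ s2 ++ s3) : Int))) extra).sum = 0 := by
    apply List.sum_eq_zero
    intro y hy
    obtain ⟨k, hk, rfl⟩ := List.mem_map.mp hy
    have h0 : List.count k s1 = 0 := List.count_eq_zero.mpr (hxmem k hk)
    have hne : ¬ ((List.count k (s1 ++ s2 ++ s3) : Int) = 3) := by
      have := hc2 k; have := hc3 k
      simp only [List.count_append]
      push_cast
      omega
    simp only [Function.comp_apply, beq_iff_eq, hne, if_false]
  rw [hzero, add_zero]
  apply congrArg List.sum
  apply List.map_congr_left
  intro k hk
  have e1 : List.count k s1 = 1 := by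
    have := List.count_pos_iff.mpr hk; have := hc1 k; omega
  simp only [Function.comp_apply, List.count_append]
  by_cases h2 : k ∈ s2 <;> by_cases h3 : k ∈ s3
  · have e2 : List.count k s2 = 1 := by have := List.count_pos_iff.mpr h2; have := hc2 k; omega
    have e3 : List.count k s3 = 1 := by have := List.count_pos_iff.mpr h3; have := hc3 k; omega
    simp [h2, h3, e1, e2, e3]
  · have e3 : List.count k s3 = 0 := List.count_eq_zero.mpr h3
    have : ¬ ((List.count k s1 + List.count k s2 + List.count k s3 : Int) = 3) := by
      have := hc2 k; push_cast; omega
    simp [h3, this]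
  · have e2 : List.count k s2 = 0 := List.count_eq_zero.mpr h2
    have : ¬ ((List.count k s1 + List.count k s2 + List.count k s3 : Int) = 3) := by
      have := hc3 k; push_cast; omega
    simp [h2, this]
  · have e2 : List.count k s2 = 0 := List.count_eq_zero.mpr h2
    have e3 : List.count k s3 = 0 := List.count_eq_zero.mpr h3
    have : ¬ ((List.count k s1 + List.count k s2 + List.count k s3 : Int) = 3) := by
      push_cast; omega
    simp [h2, this]
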